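-- pv_equiv track=rewrite | github.com/lbl-cbg/t5-commons | data_management/jamo/lapinpy/src/lapinpy/mysqlrestful.py | parse_default_query
-- ===== SOURCE A (Python) =====
-- def parse_default_query(query, select_count, parameters):
--     default_query = parameters['query'].replace('?', '%')
--     query_parts = default_query.split(' ')
--     join_clause_indicator = ['left', 'right', 'join', 'inner', 'outer']
--
--     for index, part in enumerate(query_parts):
--         if part == 'like':
--             like_index = index + 1
--             if '%' not in query_parts[like_index]:
--                 query_parts[like_index] = '"%' + query_parts[like_index].replace('"', '') + '%"'
--         elif part == 'nin':
--             query_parts[index] = 'not in'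
--         elif part == 'in':
--             pass
--         elif part in join_clause_indicator:
--             if 'where' in query_parts[index:]:
--                 where_index = query_parts.index('where')
--                 query += ' '.join(query_parts[index: where_index])
--                 query_parts = query_parts[:index] + query_parts[where_index:]
--             else:
--                 query += ' '.join(query_parts[index:])
--                 query_parts = query_parts[:index]
--             break
--
--             # If it is more complex than a where clause, the whole query (minus SELECT and FROM) is expected.
--     if 'where' not in query_parts and len(query_parts) > 0 and (len(query_parts) > 1 or query_parts[0] != ''):
--         query += ' where '
--         select_count += ' where '
--
--     default_query = ' '.join(query_parts)
--     query += default_query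
--     select_count += default_query
--
--     return query, select_count
-- ===== SOURCE B (Python) =====
-- JOIN_INDICATORS = frozenset(('left', 'right', 'join', 'inner', 'outer'))
--
--
-- def _boundary(tokens):
--     """Index of the first join indicator, or len(tokens) if there is none.
--
--     The token following 'like' is a match pattern, never a keyword, so the
--     scan steps over it.
--     """
--     k = 0
--     n = len(tokens)
--     while k < n:
--         t = tokens[k]
--         if t == 'like':
--             k += 2
--         elif t in JOIN_INDICATORS:
--             return k
--         else:
--             k += 1
--     return n
--
--
-- def _rewrite(tokens):
--     """Quote the pattern after each 'like' and spell out 'nin'."""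
--     out = []
--     i = 0
--     n = len(tokens)
--     while i < n:
--         t = tokens[i]
--         if t == 'like' and i + 1 < n:
--             out.append(t)
--             nxt = tokens[i + 1]
--             if '%' not in nxt:
--                 nxt = '"%' + nxt.replace('"', '') + '%"'
--             out.append(nxt)
--             i += 2
--         elif t == 'nin':
--             out.append('not in')
--             i += 1
--         else:
--             out.append(t)
--             i += 1
--     return out
--
--
-- def parse_default_query(query, select_count, parameters):
--     tokens = parameters['query'].replace('?', '%').split(' ')
--     j = _boundary(tokens)
--     if j < len(tokens):
--         new_tokens = _rewrite(tokens[:j]) + tokens[j:]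
--         if 'where' in new_tokens[j:]:
--             wi = new_tokens.index('where')
--             query += ' '.join(new_tokens[j:wi])
--             rest = new_tokens[:j] + new_tokens[wi:]
--         else:
--             query += ' '.join(new_tokens[j:])
--             rest = new_tokens[:j]
--     else:
--         rest = _rewrite(tokens)
--
--     if 'where' not in rest and rest and (len(rest) > 1 or rest[0] != ''):
--         query += ' where '
--         select_count += ' where '
--
--     tail = ' '.join(rest)
--     return query + tail, select_count + tail
-- ===== Notes on version B (the rewrite author's own statement) =====
-- stated objective: alternative
-- what changed: A's single interleaved pass that mutates the token list in place while scanning for a join indicator is replaced by two independent passes - a boundary scan locating the first join indicator (stepping over each like-pattern token) and a pure rewriting pass over the reached prefix - followed by slice-based assembly; Pre_ excludes parameter lists without a 'query' key (KeyError) and token lists ending in an odd run of 'like' (A's loop can raise IndexError there).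
-- outside the precondition, e.g. on parse_default_query('Q', 'S', {'query': 'left like'}): A returns ('Qleft like', 'S'), B returns ('Qleft like', 'S')
import Mathlib
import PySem

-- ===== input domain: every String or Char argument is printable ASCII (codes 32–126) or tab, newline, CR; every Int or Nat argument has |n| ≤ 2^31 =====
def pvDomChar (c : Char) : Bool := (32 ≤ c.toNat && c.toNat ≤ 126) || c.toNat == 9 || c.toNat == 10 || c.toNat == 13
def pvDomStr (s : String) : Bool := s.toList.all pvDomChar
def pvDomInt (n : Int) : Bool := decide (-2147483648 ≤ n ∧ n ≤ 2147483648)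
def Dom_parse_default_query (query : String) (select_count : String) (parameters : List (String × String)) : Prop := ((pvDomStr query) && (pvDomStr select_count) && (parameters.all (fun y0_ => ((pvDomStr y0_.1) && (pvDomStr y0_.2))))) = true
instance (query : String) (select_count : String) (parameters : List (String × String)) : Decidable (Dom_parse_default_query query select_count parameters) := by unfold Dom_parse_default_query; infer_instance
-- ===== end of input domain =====

-- B rewrites A's single interleaved mutating pass as two independent passes (boundary scan, then token
-- rewriting of the reached prefix) plus slice-based assembly; same return value, alternative decomposition.

-- the quoting expression (occurs verbatim in both Pythons)
def pdqQuote (x : String) : String :=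
  if PySem.Str.isIn "%" x then x
  else "\"%" ++ PySem.Str.replace x "\"" "" ++ "%\""

-- ===== PORT A =====
def pdqJoins : List String := ["left", "right", "join", "inner", "outer"]

-- A's for-loop over the in-place-mutated list, as a recursion with the processed prefix `done`
-- as accumulator (index = done.length, current list = done ++ todo).
def pdqLoop (done todo : List String) (query : String) : String × List String :=
  match todo with
  | [] => (query, done)
  | t :: rest =>
    if t = "like" then
      match rest with
      | [] => (query, done ++ todo)  -- Python raises IndexError here (excluded by Pre_)
      | x :: rs => pdqLoop (done ++ [t]) (pdqQuote x :: rs) query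
    else if t = "nin" then pdqLoop (done ++ ["not in"]) rest query
    else if t = "in" then pdqLoop (done ++ [t]) rest query
    else if t ∈ pdqJoins then
      let parts := done ++ todo
      if "where" ∈ todo then
        match PySem.List.index? parts "where" with
        | some wi =>
            (query ++ PySem.Str.join " " ((parts.drop done.length).take (wi - done.length)),
             parts.take done.length ++ parts.drop wi)
        | none => (query, parts)  -- unreachable: "where" ∈ todo ⊆ parts
      else (query ++ PySem.Str.join " " todo, done)
    else pdqLoop (done ++ [t]) rest query
termination_by todo.length
decreasing_by all_goals simp

-- the code after A's loop (the final where-guard and joins)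
def pdqFinishA (r : String × List String) (select_count : String) : String × String :=
  let query := r.1
  let parts := r.2
  let pair :=
    if "where" ∉ parts ∧ 0 < parts.length ∧ (1 < parts.length ∨ parts.headD "" ≠ "") then
      (query ++ " where ", select_count ++ " where ")
    else (query, select_count)
  let tail := PySem.Str.join " " parts
  (pair.1 ++ tail, pair.2 ++ tail)

def parse_default_query (query : String) (select_count : String) (parameters : List (String × String)) : String × String :=
  match (PySem.Dict.mk parameters).get? "query" with
  | none => (query, select_count)  -- Python raises KeyError here (excluded by Pre_)
  | some dq =>
    match PySem.Str.split? (PySem.Str.replace dq "?" "%") " " with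
    | none => (query, select_count)  -- unreachable: the separator " " is nonempty
    | some query_parts => pdqFinishA (pdqLoop [] query_parts query) select_count

-- ===== PORT B =====
-- _boundary: index of the first join indicator (the token after 'like' is a pattern and is
-- stepped over); length of the list when there is none.
def pdqBoundary : List String → Nat
  | [] => 0
  | [t] =>
    if t = "like" then 1
    else if t ∈ pdqJoins then 0
    else 1
  | t :: x :: rs =>
    if t = "like" then 2 + pdqBoundary rs
    else if t ∈ pdqJoins then 0
    else 1 + pdqBoundary (x :: rs)

-- _rewrite: the like-quoting and nin rules over a token list
def pdqRewrite : List String → List String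
  | [] => []
  | [t] =>
    if t = "like" then [t]   -- Source B's `i + 1 < n` guard fails: the bare token is kept
    else if t = "nin" then ["not in"]
    else [t]
  | t :: x :: rs =>
    if t = "like" then t :: pdqQuote x :: pdqRewrite rs
    else if t = "nin" then "not in" :: pdqRewrite (x :: rs)
    else t :: pdqRewrite (x :: rs)

-- Source B's assembly: cut at the boundary, rewrite the reached prefix, splice at the first 'where'
def pdqAssembleB (tokens : List String) (query : String) : String × List String :=
  let j := pdqBoundary tokens
  if j < tokens.length then
    let newTokens := pdqRewrite (tokens.take j) ++ tokens.drop j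
    if "where" ∈ newTokens.drop j then
      match PySem.List.index? newTokens "where" with
      | some wi =>
          (query ++ PySem.Str.join " " ((newTokens.drop j).take (wi - j)),
           newTokens.take j ++ newTokens.drop wi)
      | none => (query, newTokens)  -- unreachable
    else (query ++ PySem.Str.join " " (newTokens.drop j), newTokens.take j)
  else (query, pdqRewrite tokens)

def parse_default_query_alt (query : String) (select_count : String) (parameters : List (String × String)) : String × String :=
  match (PySem.Dict.mk parameters).get? "query" with
  | none => (query, select_count)  -- Python raises KeyError here (excluded by Pre_)
  | some dq =>
    match PySem.Str.split? (PySem.Str.replace dq "?" "%") " " with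
    | none => (query, select_count)  -- unreachable: the separator " " is nonempty
    | some tokens =>
      -- Source B inlines the final where-guard and joins
      let r := pdqAssembleB tokens query
      let query := r.1
      let rest := r.2
      let pair :=
        if "where" ∉ rest ∧ 0 < rest.length ∧ (1 < rest.length ∨ rest.headD "" ≠ "") then
          (query ++ " where ", select_count ++ " where ")
        else (query, select_count)
      let tail := PySem.Str.join " " rest
      (pair.1 ++ tail, pair.2 ++ tail)

-- ===== PRECONDITION & SPEC =====
-- Pre_ excludes (a) parameter lists without a 'query' key (A raises KeyError) and (b) queries whose
-- token list ends in an odd-length run of 'like' tokens: on these A's loop raises IndexError unless an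
-- earlier join indicator stops the scan first (on that minority both programs return the same value).
def Pre_parse_default_query (query : String) (select_count : String) (parameters : List (String × String)) : Prop :=
  (match (PySem.Dict.mk parameters).get? "query" with
   | none => false
   | some dq =>
     match PySem.Str.split? (PySem.Str.replace dq "?" "%") " " with
     | none => true
     | some tokens => (tokens.reverse.takeWhile (· == "like")).length % 2 == 0) = true

instance (query : String) (select_count : String) (parameters : List (String × String)) : Decidable (Pre_parse_default_query query select_count parameters) := by unfold Pre_parse_default_query; infer_instance

def pvWitness_parse_default_query : String × String × (List (String × String)) :=
  ("select * from t", "select count(*) from t", [("query", "id like ?7? nin left join u where name in")])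

def Spec_parse_default_query (query : String) (select_count : String) (parameters : List (String × String)) (out : String × String) : Prop := out = parse_default_query_alt query select_count parameters
instance (query : String) (select_count : String) (parameters : List (String × String)) (out : String × String) : Decidable (Spec_parse_default_query query select_count parameters out) := by unfold Spec_parse_default_query; infer_instance

-- ===== CLAIM (what is proved, stated in full; the proofs are below) =====
def Claim_equal_parse_default_query : Prop := ∀ (query : String) (select_count : String) (parameters : List (String × String)), Dom_parse_default_query query select_count parameters → Pre_parse_default_query query select_count parameters → Spec_parse_default_query query select_count parameters (parse_default_query query select_count parameters)

-- ===== LEMMAS AND PROOFS =====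

-- the break-time computation of A's loop, parametrised by the mutated list and the break index
def pdqCore (parts : List String) (i : Nat) (q : String) : String × List String :=
  if "where" ∈ parts.drop i then
    match PySem.List.index? parts "where" with
    | some wi =>
        (q ++ PySem.Str.join " " ((parts.drop i).take (wi - i)), parts.take i ++ parts.drop wi)
    | none => (q, parts)
  else (q ++ PySem.Str.join " " (parts.drop i), parts.take i)

-- B's assembly of the loop's result, generalized by the processed prefix `done`
def pdqAssemble (done todo : List String) (q : String) : String × List String :=
  let j := pdqBoundary todo
  if j < todo.length then
    pdqCore (done ++ pdqRewrite (todo.take j) ++ todo.drop j) (done.length + j) q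
  else (q, done ++ pdqRewrite todo)

theorem pdqQuote_not_kw (x : String) :
    pdqQuote x ≠ "like" ∧ pdqQuote x ≠ "nin" ∧ pdqQuote x ≠ "in" ∧ pdqQuote x ∉ pdqJoins := by
  unfold pdqQuote
  split
  · rename_i h
    refine ⟨?_, ?_, ?_, ?_⟩ <;> intro hx <;> first
      | (subst hx; revert h; decide)
      | (simp [pdqJoins] at hx
         rcases hx with hx | hx | hx | hx | hx <;> (subst hx; revert h; decide))
  · have hhead : ∀ s : String, ("\"%" ++ s ++ "%\"").toList.head? = some '"' := by
      intro s; simp [String.toList_append]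
    refine ⟨?_, ?_, ?_, ?_⟩ <;> intro hx <;> first
      | (have := congrArg (fun s : String => s.toList.head?) hx
         simp only [hhead] at this
         simp at this)
      | (simp [pdqJoins] at hx
         rcases hx with hx | hx | hx | hx | hx <;>
           (have := congrArg (fun s : String => s.toList.head?) hx
            simp only [hhead] at this
            simp at this))

theorem pdqRewrite_cons (t : String) (l : List String) (ht : t ≠ "like") :
    pdqRewrite (t :: l) = (if t = "nin" then "not in" else t) :: pdqRewrite l := by
  cases l <;> simp only [pdqRewrite, if_neg ht] <;> split_ifs <;> simp only [pdqRewrite]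

theorem pdqBoundary_cons (t : String) (l : List String) (ht : t ≠ "like") :
    pdqBoundary (t :: l) = if t ∈ pdqJoins then 0 else 1 + pdqBoundary l := by
  cases l <;> simp [pdqBoundary, ht]

theorem pdqLoop_skip (done : List String) (x : String) (rs : List String) (q : String)
    (h1 : x ≠ "like") (h2 : x ≠ "nin") (h3 : x ≠ "in") (h4 : x ∉ pdqJoins) :
    pdqLoop done (x :: rs) q = pdqLoop (done ++ [x]) rs q := by
  rw [pdqLoop.eq_def]
  simp [h1, h2, h3, h4]

theorem pdqAssemble_step (t : String) (done rest : List String) (q : String)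
    (ht : t ≠ "like") (hj : t ∉ pdqJoins) :
    pdqAssemble done (t :: rest) q
      = pdqAssemble (done ++ [if t = "nin" then "not in" else t]) rest q := by
  unfold pdqAssemble
  rw [pdqBoundary_cons t rest ht]
  simp only [if_neg hj]
  by_cases hb : pdqBoundary rest < rest.length
  · rw [if_pos (by simp; omega), if_pos hb]
    have htake : (t :: rest).take (1 + pdqBoundary rest) = t :: rest.take (pdqBoundary rest) := by
      have h1 : 1 + pdqBoundary rest = pdqBoundary rest + 1 := by omega
      simp [h1]
    have hdrop : (t :: rest).drop (1 + pdqBoundary rest) = rest.drop (pdqBoundary rest) := by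
      have h1 : 1 + pdqBoundary rest = pdqBoundary rest + 1 := by omega
      simp [h1]
    rw [htake, hdrop, pdqRewrite_cons t _ ht]
    have hparts : done ++ ((if t = "nin" then "not in" else t) :: pdqRewrite (rest.take (pdqBoundary rest))) ++ rest.drop (pdqBoundary rest)
        = (done ++ [if t = "nin" then "not in" else t]) ++ pdqRewrite (rest.take (pdqBoundary rest)) ++ rest.drop (pdqBoundary rest) := by
      simp
    rw [hparts]
    have hi : done.length + (1 + pdqBoundary rest)
        = (done ++ [if t = "nin" then "not in" else t]).length + pdqBoundary rest := by
      simp; omega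
    rw [hi]
  · rw [if_neg (by simp; omega), if_neg hb]
    rw [pdqRewrite_cons t rest ht]
    simp

theorem pdqAssemble_like (x : String) (rs done : List String) (q : String) :
    pdqAssemble done ("like" :: x :: rs) q
      = pdqAssemble (done ++ ["like", pdqQuote x]) rs q := by
  unfold pdqAssemble
  have hb : pdqBoundary ("like" :: x :: rs) = 2 + pdqBoundary rs := by simp [pdqBoundary]
  rw [hb]
  by_cases hbnd : pdqBoundary rs < rs.length
  · rw [if_pos (by simp; omega), if_pos hbnd]
    have htake : ("like" :: x :: rs).take (2 + pdqBoundary rs)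
        = "like" :: x :: rs.take (pdqBoundary rs) := by
      have h1 : 2 + pdqBoundary rs = (pdqBoundary rs + 1) + 1 := by omega
      simp [h1]
    have hdrop : ("like" :: x :: rs).drop (2 + pdqBoundary rs) = rs.drop (pdqBoundary rs) := by
      have h1 : 2 + pdqBoundary rs = (pdqBoundary rs + 1) + 1 := by omega
      simp [h1]
    rw [htake, hdrop]
    have hrw : pdqRewrite ("like" :: x :: rs.take (pdqBoundary rs))
        = "like" :: pdqQuote x :: pdqRewrite (rs.take (pdqBoundary rs)) := by
      simp [pdqRewrite]
    rw [hrw]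
    have hparts : done ++ ("like" :: pdqQuote x :: pdqRewrite (rs.take (pdqBoundary rs))) ++ rs.drop (pdqBoundary rs)
        = (done ++ ["like", pdqQuote x]) ++ pdqRewrite (rs.take (pdqBoundary rs)) ++ rs.drop (pdqBoundary rs) := by
      simp
    rw [hparts]
    have hi : done.length + (2 + pdqBoundary rs)
        = (done ++ ["like", pdqQuote x]).length + pdqBoundary rs := by
      simp; omega
    rw [hi]
  · rw [if_neg (by simp; omega), if_neg hbnd]
    simp [pdqRewrite]

theorem pdqLoop_eq_assemble : ∀ (n : Nat) (todo : List String), todo.length ≤ n →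
    ∀ (done : List String) (q : String), pdqLoop done todo q = pdqAssemble done todo q := by
  intro n
  induction n with
  | zero =>
    intro todo h done q
    have : todo = [] := List.eq_nil_of_length_eq_zero (by omega)
    subst this
    simp [pdqLoop, pdqAssemble, pdqBoundary, pdqRewrite]
  | succ m ih =>
    intro todo h done q
    match todo with
    | [] => simp [pdqLoop, pdqAssemble, pdqBoundary, pdqRewrite]
    | t :: rest =>
      by_cases hlike : t = "like"
      · subst hlike
        match rest with
        | [] =>
          rw [pdqLoop.eq_def]
          unfold pdqAssemble
          simp [pdqBoundary, pdqRewrite]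
        | x :: rs =>
          rw [pdqLoop.eq_def]
          simp only [if_true, reduceIte]
          obtain ⟨h1, h2, h3, h4⟩ := pdqQuote_not_kw x
          rw [pdqLoop_skip (_ ++ ["like"]) (pdqQuote x) rs q h1 h2 h3 h4]
          have hlen : rs.length ≤ m := by simp at h; omega
          rw [ih rs hlen]
          rw [pdqAssemble_like]
          simp
      · by_cases hjoin : t ∈ pdqJoins
        · have hnin : t ≠ "nin" := by rintro rfl; revert hjoin; decide
          have hin : t ≠ "in" := by rintro rfl; revert hjoin; decide
          rw [pdqLoop.eq_def]
          simp only [if_neg hlike, if_neg hnin, if_neg hin, if_pos hjoin]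
          unfold pdqAssemble
          rw [pdqBoundary_cons t rest hlike]
          simp only [if_pos hjoin]
          have hlt : (0 : Nat) < (t :: rest).length := by simp
          rw [if_pos hlt]
          unfold pdqCore
          simp [pdqRewrite]
        · rw [pdqAssemble_step t done rest q hlike hjoin]
          have hlen : rest.length ≤ m := by simp at h; omega
          rw [← ih rest hlen]
          rw [pdqLoop.eq_def]
          by_cases hnin : t = "nin"
          · simp [hnin]
          · by_cases hin : t = "in"
            · simp [hlike, hin]
            · simp [hlike, hnin, hin, hjoin]

theorem pdqAssemble_nil_eq (tokens : List String) (q : String) :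
    pdqAssemble [] tokens q = pdqAssembleB tokens q := by
  unfold pdqAssemble pdqAssembleB pdqCore
  set j := pdqBoundary tokens with hj
  by_cases hb : j < tokens.length
  · simp only [if_pos hb, List.nil_append, List.length_nil, Nat.zero_add]
  · simp [if_neg hb]

-- ===== VERDICT (by name: the statement is the Claim_ definition above) =====
theorem parse_default_query_spec : Claim_equal_parse_default_query := by
  intro query select_count parameters _hdom _hpre
  unfold Spec_parse_default_query parse_default_query parse_default_query_alt
  generalize (PySem.Dict.mk parameters).get? "query" = oq
  cases oq with
  | none => rfl
  | some dq =>
    dsimp only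
    generalize PySem.Str.split? (PySem.Str.replace dq "?" "%") " " = ot
    cases ot with
    | none => rfl
    | some tokens =>
      dsimp only
      rw [pdqLoop_eq_assemble tokens.length tokens (le_refl _) [] query,
        pdqAssemble_nil_eq]
      rfl
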